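-- pv_equiv track=rewrite | github.com/daniel-reich/ubiquitous-fiesta | HzeTvQqnH2afZs6GY_17.py | generate_rug
-- ===== SOURCE A (Python) =====
-- def generate_rug(n, direction):
--     res = []
--     if n == 1: return [[0]]
--     if direction == 'left':
--         tempLst = []
--         res = []
--         for col in range(n):
--             tempLst.append(col)
--         res.append(tempLst)
--         tempLst = []
--         col = 0
--         row = 1
--         while True:
--             if col >= n:
--                 res.append(tempLst)
--                 tempLst = []
--                 row += 1
--                 col = 0
--                 tempLst.append(res[row - 1][0] + 1)
--                 if row == n and col == 0: break
--                 col += 1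
--             else:
--                 if col == 0:
--                     tempLst.append(row)
--                     col += 1
--                 tempLst.append(res[row -1][col - 1])
--                 col += 1
--     else:
--         tempLst = []
--         res = []
--         for col in range(n):
--             tempLst.append(n - col - 1)
--         res.append(tempLst)
--         tempLst = []
--         col = 0
--         row = 1
--         while True:
--             if col >= n - 1:
--                 tempLst.append(row)
--                 res.append(tempLst)
--                 tempLst = []
--                 row += 1
--                 col = 0
--                 if row == n: break
--             else:
--                 if col == n - 1:
--                     tempLst.append(row - 1)
--                     res.append(tempLst)
--                     tempLst = []
--                     col = 0
--                     row += 1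
--                     if row == n: break
--                 tempLst.append(res[row - 1][col + 1])
--                 col += 1
--     return res
-- ===== SOURCE B (Python) =====
-- def generate_rug(n, direction):
--     if n == 1:
--         return [[0]]
--     if direction == 'left':
--         return [[abs(i - j) for j in range(n)] for i in range(n)]
--     return [[abs(i + j - (n - 1)) for j in range(n)] for i in range(n)]
-- ===== Notes on version B (the rewrite author's own statement) =====
-- stated objective: simpler
-- what changed: Replaces A's two stateful while-loops that build each row by copying shifted entries of the previous row with direct closed-form cell values abs(i-j) (left) / abs(i+j-(n-1)) (otherwise) over nested ranges.
import Mathlib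
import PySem

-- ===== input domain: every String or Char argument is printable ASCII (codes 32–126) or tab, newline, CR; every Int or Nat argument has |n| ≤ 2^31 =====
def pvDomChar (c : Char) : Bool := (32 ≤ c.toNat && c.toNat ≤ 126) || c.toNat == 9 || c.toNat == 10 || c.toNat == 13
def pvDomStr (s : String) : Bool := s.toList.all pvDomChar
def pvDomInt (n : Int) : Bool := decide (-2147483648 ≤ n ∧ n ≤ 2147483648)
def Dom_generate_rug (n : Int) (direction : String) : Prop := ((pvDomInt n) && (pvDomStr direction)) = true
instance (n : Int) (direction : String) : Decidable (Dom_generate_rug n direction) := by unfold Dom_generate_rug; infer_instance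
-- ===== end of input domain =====

-- B computes each cell by a closed formula instead of A's row-copying while-loops; equal on Pre_ (n ≥ 1).

-- ===== PORT A =====
-- A's 'left' while-loop, transliterated with a fuel counter that only makes it total
-- (fuel is never exhausted on inputs satisfying Pre_); res[row-1][...] is ported as
-- pyGetD, in range on every path reached under Pre_ (out of range = Python's IndexError,
-- reached only outside Pre_).
def pvLoopL (n : Int) : Nat → List (List Int) → List Int → Int → Int → List (List Int)
  | 0, res, _, _, _ => res
  | fuel+1, res, tempLst, row, col =>
    if n ≤ col then
      let res' := res ++ [tempLst]
      let row' := row + 1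
      let t' := [PySem.List.pyGetD (PySem.List.pyGetD res' (row' - 1) []) 0 0 + 1]
      if row' = n then res'
      else pvLoopL n fuel res' t' row' 1
    else
      let tc : List Int × Int := if col = 0 then (tempLst ++ [row], col + 1) else (tempLst, col)
      pvLoopL n fuel res
        (tc.1 ++ [PySem.List.pyGetD (PySem.List.pyGetD res (row - 1) []) (tc.2 - 1) 0]) row (tc.2 + 1)

-- A's other-direction while-loop; the Python inner 'if col == n - 1' branch is transliterated
-- even though it sits under 'col < n - 1' and can never fire.
def pvLoopR (n : Int) : Nat → List (List Int) → List Int → Int → Int → List (List Int)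
  | 0, res, _, _, _ => res
  | fuel+1, res, tempLst, row, col =>
    if n - 1 ≤ col then
      let res' := res ++ [tempLst ++ [row]]
      let row' := row + 1
      if row' = n then res'
      else pvLoopR n fuel res' [] row' 0
    else
      if col = n - 1 then
        let res' := res ++ [tempLst ++ [row - 1]]
        let row' := row + 1
        if row' = n then res'
        else pvLoopR n fuel res'
          [PySem.List.pyGetD (PySem.List.pyGetD res' (row' - 1) []) 1 0] row' 1
      else
        pvLoopR n fuel res
          (tempLst ++ [PySem.List.pyGetD (PySem.List.pyGetD res (row - 1) []) (col + 1) 0]) row (col + 1)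

def generate_rug (n : Int) (direction : String) : List (List Int) :=
  if n = 1 then [[0]]
  else if direction = "left" then
    pvLoopL n ((n.toNat + 2) * (n.toNat + 2)) [PySem.List.pyRange 0 n 1] [] 1 0
  else
    pvLoopR n ((n.toNat + 2) * (n.toNat + 2))
      [(PySem.List.pyRange 0 n 1).map (fun col => n - col - 1)] [] 1 0

-- ===== PORT B =====
def generate_rug_alt (n : Int) (direction : String) : List (List Int) :=
  if n = 1 then [[0]]
  else if direction = "left" then
    (PySem.List.pyRange 0 n 1).map (fun i => (PySem.List.pyRange 0 n 1).map (fun j => |i - j|))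
  else
    (PySem.List.pyRange 0 n 1).map (fun i => (PySem.List.pyRange 0 n 1).map (fun j => |i + j - (n - 1)|))

-- ===== PRECONDITION & SPEC =====
-- Pre_: for n ≤ 0 A raises IndexError (direction 'left') or loops forever (any other direction).
def Pre_generate_rug (n : Int) (direction : String) : Prop := 1 ≤ n
instance (n : Int) (direction : String) : Decidable (Pre_generate_rug n direction) := by
  unfold Pre_generate_rug; infer_instance
def pvWitness_generate_rug : Int × String := (3, "left")

def Spec_generate_rug (n : Int) (direction : String) (out : List (List Int)) : Prop :=
  out = generate_rug_alt n direction
instance (n : Int) (direction : String) (out : List (List Int)) : Decidable (Spec_generate_rug n direction out) := by unfold Spec_generate_rug; infer_instance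

-- ===== CLAIM (what is proved, stated in full; the proofs are below) =====
def Claim_equal_generate_rug : Prop := ∀ (n : Int) (direction : String), Dom_generate_rug n direction → Pre_generate_rug n direction → Spec_generate_rug n direction (generate_rug n direction)

-- ===== LEMMAS AND PROOFS =====

-- the row closed forms (proof-only helpers)
def pvRowL (n r : Int) : List Int := (PySem.List.pyRange 0 n 1).map (fun j => |r - j|)
def pvRowR (n r : Int) : List Int := (PySem.List.pyRange 0 n 1).map (fun j => |r + j - (n - 1)|)

-- loop invariant of A's 'left' loop: at the top of an iteration with 1 ≤ row < n and
-- 1 ≤ col ≤ n, res holds the first `row` closed-form rows and tempLst the first `col`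
-- cells of row `row`; with enough fuel the loop returns the full closed-form grid.
theorem pvLoopL_inv (n : Int) (hn : 2 ≤ n) : ∀ (fuel : Nat) (r c : Nat),
    1 ≤ r → (r : Int) < n → 1 ≤ c → (c : Int) ≤ n →
    (n.toNat - r) * (n.toNat + 2) + (n.toNat - c) < fuel →
    pvLoopL n fuel ((PySem.List.pyRange 0 (r : Int) 1).map (pvRowL n))
      ((PySem.List.pyRange 0 (c : Int) 1).map (fun j => |(r : Int) - j|)) (r : Int) (c : Int)
      = (PySem.List.pyRange 0 n 1).map (pvRowL n) := by
  intro fuel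
  induction fuel with
  | zero => intro r c _ _ _ _ h5; omega
  | succ fuel ih =>
    intro r c hr1 hr2 hc1 hc2 hfuel
    by_cases hcn : (c : Int) = n
    · -- wrap to next row
      simp only [pvLoopL, if_pos (by omega : n ≤ (c : Int))]
      rw [hcn]
      have hres' : (PySem.List.pyRange 0 (r:Int) 1).map (pvRowL n) ++
            [(PySem.List.pyRange 0 n 1).map (fun j => |(r:Int) - j|)] =
          (PySem.List.pyRange 0 ((r:Int)+1) 1).map (pvRowL n) := by
        rw [PySem.List.pyRange_one_succ_right (by omega), List.map_append]; rfl
      rw [hres']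
      rw [show (r:Int) + 1 - 1 = (r:Int) by ring]
      rw [PySem.List.pyGetD_map_pyRange_of_nonneg _ _ _ _ (by omega) (by omega)]
      rw [pvRowL]
      rw [PySem.List.pyGetD_map_pyRange_of_nonneg _ _ _ _ (by omega) (by omega)]
      rw [show |(r:Int) - 0| = (r:Int) by rw [sub_zero]; exact abs_of_nonneg (by omega)]
      by_cases hrn : (r:Int) + 1 = n
      · rw [if_pos hrn, hrn]
      · rw [if_neg hrn]
        have h1 : [(r:Int) + 1] =
            (PySem.List.pyRange 0 ((1:Nat):Int) 1).map (fun j => |((r+1:Nat):Int) - j|) := by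
          rw [show ((1:Nat):Int) = 1 by rfl,
            show PySem.List.pyRange 0 1 1 = [0] from by decide]
          simp
          exact (abs_of_nonneg (by omega)).symm
        have h2 : (r:Int) + 1 = ((r+1:Nat):Int) := by push_cast; ring
        rw [h1, h2]
        have hkey : (n.toNat - r) * (n.toNat + 2) =
            (n.toNat - (r+1)) * (n.toNat + 2) + (n.toNat + 2) := by
          rw [show n.toNat - r = (n.toNat - (r+1)) + 1 by omega]; ring
        exact ih (r+1) 1 (by omega) (by omega) (by omega) (by omega) (by omega)
    · -- one more column
      have hclt : (c : Int) < n := lt_of_le_of_ne hc2 hcn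
      simp only [pvLoopL, if_neg (by omega : ¬ n ≤ (c : Int)),
        if_neg (by omega : ¬ (c : Int) = 0)]
      rw [show (r:Int) - 1 = ((r - 1 : Nat) : Int) by omega]
      rw [PySem.List.pyGetD_map_pyRange_of_nonneg _ _ _ _ (by omega) (by omega)]
      rw [pvRowL]
      rw [PySem.List.pyGetD_map_pyRange_of_nonneg _ _ _ _ (by omega) (by omega)]
      have habs : |((r - 1 : Nat) : Int) - ((c:Int) - 1)| = |(r:Int) - (c:Int)| := by
        congr 1; omega
      rw [habs]
      have hext : (PySem.List.pyRange 0 (c:Int) 1).map (fun j => |(r:Int) - j|) ++ [|(r:Int) - (c:Int)|]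
          = (PySem.List.pyRange 0 ((c+1 : Nat) : Int) 1).map (fun j => |(r:Int) - j|) := by
        push_cast
        rw [PySem.List.pyRange_one_succ_right (by omega), List.map_append]; simp
      rw [hext, show (c:Int) + 1 = ((c+1 : Nat) : Int) by push_cast; ring]
      exact ih r (c+1) hr1 hr2 (by omega) (by omega) (by omega)

-- loop invariant of A's other-direction loop: 1 ≤ row < n, 0 ≤ col ≤ n-1, res holds the
-- first `row` closed-form rows, tempLst the first `col` cells of row `row`.
theorem pvLoopR_inv (n : Int) (hn : 2 ≤ n) : ∀ (fuel : Nat) (r c : Nat),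
    1 ≤ r → (r : Int) < n → (c : Int) ≤ n - 1 →
    (n.toNat - r) * (n.toNat + 2) + (n.toNat - c) < fuel →
    pvLoopR n fuel ((PySem.List.pyRange 0 (r : Int) 1).map (pvRowR n))
      ((PySem.List.pyRange 0 (c : Int) 1).map (fun j => |(r : Int) + j - (n - 1)|)) (r : Int) (c : Int)
      = (PySem.List.pyRange 0 n 1).map (pvRowR n) := by
  intro fuel
  induction fuel with
  | zero => intro r c _ _ _ h4; omega
  | succ fuel ih =>
    intro r c hr1 hr2 hc2 hfuel
    by_cases hcn : (c : Int) = n - 1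
    · -- wrap to next row
      simp only [pvLoopR, if_pos (by omega : n - 1 ≤ (c : Int))]
      rw [hcn]
      have habs : |(r:Int) + (n-1) - (n-1)| = (r:Int) := by
        rw [show (r:Int) + (n-1) - (n-1) = (r:Int) by ring]; exact abs_of_nonneg (by omega)
      have hsingle : PySem.List.pyRange (n-1) n 1 = [n-1] := by
        rw [PySem.List.pyRange_one, show n - (n-1) = 1 by ring]
        simp
      have hrow : (PySem.List.pyRange 0 (n-1) 1).map (fun j => |(r:Int) + j - (n - 1)|) ++ [(r:Int)]
          = (PySem.List.pyRange 0 n 1).map (fun j => |(r:Int) + j - (n - 1)|) := by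
        rw [PySem.List.pyRange_one_append 0 (n-1) n (by omega) (by omega), List.map_append,
          hsingle]
        simp
      rw [hrow]
      have hres' : (PySem.List.pyRange 0 (r:Int) 1).map (pvRowR n) ++
            [(PySem.List.pyRange 0 n 1).map (fun j => |(r:Int) + j - (n - 1)|)] =
          (PySem.List.pyRange 0 ((r:Int)+1) 1).map (pvRowR n) := by
        rw [PySem.List.pyRange_one_succ_right (by omega), List.map_append]; rfl
      rw [hres']
      by_cases hrn : (r:Int) + 1 = n
      · rw [if_pos hrn, hrn]
      · rw [if_neg hrn]
        have h1 : ([] : List Int) =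
            (PySem.List.pyRange 0 ((0:Nat):Int) 1).map (fun j => |((r+1:Nat):Int) + j - (n-1)|) := by
          simp
        have h2 : (r:Int) + 1 = ((r+1:Nat):Int) := by push_cast; ring
        rw [h1, h2]
        have hkey : (n.toNat - r) * (n.toNat + 2) =
            (n.toNat - (r+1)) * (n.toNat + 2) + (n.toNat + 2) := by
          rw [show n.toNat - r = (n.toNat - (r+1)) + 1 by omega]; ring
        exact ih (r+1) 0 (by omega) (by omega) (by omega) (by omega)
    · -- one more column
      have hclt : (c : Int) < n - 1 := lt_of_le_of_ne hc2 hcn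
      simp only [pvLoopR, if_neg (by omega : ¬ n - 1 ≤ (c : Int)), if_neg hcn]
      rw [show (r:Int) - 1 = ((r - 1 : Nat) : Int) by omega]
      rw [PySem.List.pyGetD_map_pyRange_of_nonneg _ _ _ _ (by omega) (by omega)]
      rw [pvRowR]
      rw [PySem.List.pyGetD_map_pyRange_of_nonneg _ _ _ _ (by omega) (by omega)]
      have habs : |((r - 1 : Nat) : Int) + ((c:Int) + 1) - (n - 1)| = |(r:Int) + (c:Int) - (n-1)| := by
        congr 1; omega
      rw [habs]
      have hext : (PySem.List.pyRange 0 (c:Int) 1).map (fun j => |(r:Int) + j - (n-1)|) ++ [|(r:Int) + (c:Int) - (n-1)|]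
          = (PySem.List.pyRange 0 ((c+1 : Nat) : Int) 1).map (fun j => |(r:Int) + j - (n-1)|) := by
        push_cast
        rw [PySem.List.pyRange_one_succ_right (by omega), List.map_append]; simp
      rw [hext, show (c:Int) + 1 = ((c+1 : Nat) : Int) by push_cast; ring]
      exact ih r (c+1) hr1 hr2 (by omega) (by omega)

theorem pvFuelKey (N : Nat) (hN : 2 ≤ N) :
    (N - 1) * (N + 2) + 3 * (N + 2) = (N + 2) * (N + 2) := by
  obtain ⟨k, hk⟩ : ∃ k, N = k + 2 := ⟨N - 2, by omega⟩
  subst hk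
  rw [show k + 2 - 1 = k + 1 from rfl]
  ring

-- ===== VERDICT (by name: the statement is the Claim_ definition above) =====
theorem generate_rug_spec : Claim_equal_generate_rug := by
  intro n direction _ hpre
  unfold Pre_generate_rug at hpre
  unfold Spec_generate_rug generate_rug generate_rug_alt
  by_cases h1 : n = 1
  · rw [if_pos h1, if_pos h1]
  · have hn : 2 ≤ n := by omega
    have hNn : ((n.toNat : Int)) = n := Int.toNat_of_nonneg (by omega)
    rw [if_neg h1, if_neg h1]
    by_cases hd : direction = "left"
    · rw [if_pos hd, if_pos hd]
      -- peel the first iteration (row 1, col 0) by hand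
      obtain ⟨F, hF⟩ : ∃ k, (n.toNat + 2) * (n.toNat + 2) = k + 1 := by
        have hpos : 0 < (n.toNat + 2) * (n.toNat + 2) := by positivity
        exact ⟨(n.toNat + 2) * (n.toNat + 2) - 1, by omega⟩
      rw [hF]
      have hrow0 : pvRowL n 0 = PySem.List.pyRange 0 n 1 := by
        rw [pvRowL]
        conv_rhs => rw [← List.map_id (PySem.List.pyRange 0 n 1)]
        apply List.map_congr_left
        intro j hj
        rw [PySem.List.mem_pyRange_one] at hj
        simp only [id, zero_sub, abs_neg]
        exact abs_of_nonneg hj.1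
      simp only [pvLoopL, if_neg (by omega : ¬ n ≤ (0:Int))]
      norm_num
      rw [show PySem.List.pyGetD (PySem.List.pyRange 0 n 1) 0 0 = (0:Int) from by
        rw [PySem.List.pyRange_one_cons (show (0:Int) < n by omega)]
        exact PySem.List.pyGetD_zero_cons _ _ _]
      rw [show [PySem.List.pyRange 0 n 1] = (PySem.List.pyRange 0 ((1:Nat):Int) 1).map (pvRowL n) from by
        rw [show ((1:Nat):Int) = 1 from rfl, show PySem.List.pyRange 0 1 1 = [0] from by decide]
        simp [hrow0]]
      rw [show [(1:Int), 0] = (PySem.List.pyRange 0 ((2:Nat):Int) 1).map (fun j => |((1:Nat):Int) - j|) from by decide]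
      have hfuel2 : (n.toNat - 1) * (n.toNat + 2) + (n.toNat - 2) < F := by
        have := pvFuelKey n.toNat (by omega)
        omega
      simpa using pvLoopL_inv n hn F 1 2 (by omega) (by omega) (by omega) (by omega) hfuel2
    · rw [if_neg hd, if_neg hd]
      rw [show [(PySem.List.pyRange 0 n 1).map (fun col => n - col - 1)]
          = (PySem.List.pyRange 0 ((1:Nat):Int) 1).map (pvRowR n) from by
        rw [show ((1:Nat):Int) = 1 by rfl, show PySem.List.pyRange 0 1 1 = [0] from by decide]
        simp only [List.map_cons, List.map_nil]
        rw [pvRowR]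
        congr 1
        apply List.map_congr_left
        intro j hj
        rw [PySem.List.mem_pyRange_one] at hj
        rw [show (0:Int) + j - (n-1) = -(n - j - 1) by ring, abs_neg]
        exact (abs_of_nonneg (by omega)).symm]
      rw [show (0:Int) = ((0:Nat):Int) by rfl, show (1:Int) = ((1:Nat):Int) by rfl,
        show ([] : List Int) = (PySem.List.pyRange 0 ((0:Nat):Int) 1).map
          (fun j => |((1:Nat):Int) + j - (n-1)|) from by simp]
      apply pvLoopR_inv n hn _ 1 0 (by omega) (by omega) (by omega)
      have := pvFuelKey n.toNat (by omega)
      omega
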